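-- pv_equiv track=rewrite | github.com/RascalTwo/DailyProblem | problems/DailyCoding/314/solve.py | solve_iter
-- ===== SOURCE A (Python) =====
-- import itertools
-- from typing import List
--
-- def solve_iter(listeners: List[int], towers: List[int]) -> int:
-- 	for distance in itertools.count(1):
-- 		receiving = [False] * len(listeners)
-- 		for tower in towers:
-- 			tower_range = range(tower - distance, tower + distance + 1)
-- 			for i, listener in enumerate(listeners):
-- 				if listener in tower_range:
-- 					receiving[i] = True
--
-- 			if all(receiving):
-- 				return distance
-- ===== SOURCE B (Python) =====
-- def solve_iter(listeners, towers):
--     # direct formula: the answer is the largest listener-to-nearest-tower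
--     # distance, clamped to at least 1 (no search over candidate distances)
--     worst = 0
--     for listener in listeners:
--         worst = max(worst, min(abs(listener - tower) for tower in towers))
--     return max(worst, 1)
-- ===== Notes on version B (the rewrite author's own statement) =====
-- stated objective: faster
-- what changed: B replaces A's iterative-deepening search over candidate distances (re-scanning all towers and listeners for each distance 1,2,3,...) with a direct one-pass formula: the answer is max(1, max over listeners of min over towers of |listener - tower|).
import Mathlib
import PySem

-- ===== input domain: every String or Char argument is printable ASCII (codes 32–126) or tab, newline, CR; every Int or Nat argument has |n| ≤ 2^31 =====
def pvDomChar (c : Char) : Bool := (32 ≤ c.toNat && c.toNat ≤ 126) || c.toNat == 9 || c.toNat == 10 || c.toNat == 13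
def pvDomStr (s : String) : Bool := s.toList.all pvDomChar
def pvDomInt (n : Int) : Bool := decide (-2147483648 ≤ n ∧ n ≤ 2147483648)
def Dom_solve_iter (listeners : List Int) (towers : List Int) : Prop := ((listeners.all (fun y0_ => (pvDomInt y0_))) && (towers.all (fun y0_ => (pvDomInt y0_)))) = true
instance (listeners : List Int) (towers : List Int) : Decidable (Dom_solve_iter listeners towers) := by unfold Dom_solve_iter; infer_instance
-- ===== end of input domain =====

-- B replaces A's search over candidate distances with a direct max-of-min formula; equivalence proved for nonempty towers (A diverges, B raises, on towers = []).

-- ===== PORT A =====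
-- the 'for tower in towers' loop: mark listeners inside range(t-d, t+d+1),
-- return (true) as soon as all(receiving); falls off (false) when towers end
def pvInnerA (listeners : List Int) (d : Int) : List Bool → List Int → Bool
  | _, [] => false
  | recv, t :: ts =>
      let recv' := List.zipWith (fun r l => r || decide (t - d ≤ l ∧ l < t + d + 1)) recv listeners
      if recv'.all (fun b => b) then true else pvInnerA listeners d recv' ts

-- the 'for distance in itertools.count(1)' loop; fuel only bounds the number of
-- iterations (proved sufficient below), each iteration is A's code verbatim
def pvOuterA (listeners towers : List Int) : Nat → Int → Int
  | 0, _ => 0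
  | fuel + 1, d =>
      if pvInnerA listeners d (List.replicate listeners.length false) towers then d
      else pvOuterA listeners towers fuel (d + 1)

def solve_iter (listeners : List Int) (towers : List Int) : Int :=
  pvOuterA listeners towers (1 + (listeners.map Int.natAbs).sum + (towers.map Int.natAbs).sum) 1

-- ===== PORT B =====
-- min(abs(l - t) for t in towers) is PySem.List.min?; getD 0 only totalizes the
-- towers = [] case, which Pre_ excludes (Python B raises ValueError there)
def solve_iter_alt (listeners : List Int) (towers : List Int) : Int :=
  let worst := listeners.foldl
    (fun worst l => max worst ((PySem.List.min? (towers.map (fun t => |l - t|)) (fun x => x)).getD 0)) 0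
  max worst 1

-- ===== PRECONDITION & SPEC =====
-- Pre_ excludes towers = [], on which A loops forever (never returns) and B raises ValueError.
def Pre_solve_iter (listeners : List Int) (towers : List Int) : Prop := towers ≠ []
instance (listeners : List Int) (towers : List Int) : Decidable (Pre_solve_iter listeners towers) := by unfold Pre_solve_iter; infer_instance
def pvWitness_solve_iter : List Int × List Int := ([1, 5, 11, 20], [4, 8, 15])

def Spec_solve_iter (listeners : List Int) (towers : List Int) (out : Int) : Prop := out = solve_iter_alt listeners towers
instance (listeners : List Int) (towers : List Int) (out : Int) : Decidable (Spec_solve_iter listeners towers out) := by unfold Spec_solve_iter; infer_instance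

-- ===== CLAIM (what is proved, stated in full; the proofs are below) =====
def Claim_equal_solve_iter : Prop := ∀ (listeners : List Int) (towers : List Int), Dom_solve_iter listeners towers → Pre_solve_iter listeners towers → Spec_solve_iter listeners towers (solve_iter listeners towers)

-- ===== LEMMAS AND PROOFS =====

-- nearest-tower distance of listener l
def pvMind (towers : List Int) (l : Int) : Int :=
  (PySem.List.min? (towers.map (fun t => |l - t|)) (fun x => x)).getD 0

lemma alt_eq (listeners towers : List Int) :
    solve_iter_alt listeners towers =
      max (listeners.foldl (fun w l => max w (pvMind towers l)) 0) 1 := rfl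

lemma mind_le (towers : List Int) (l t : Int) (ht : t ∈ towers) :
    pvMind towers l ≤ |l - t| := by
  unfold pvMind
  cases h : PySem.List.min? (towers.map (fun t => |l - t|)) (fun x => x) with
  | none =>
      rw [PySem.List.min?_eq_none_iff, List.map_eq_nil_iff] at h
      exact absurd (h ▸ ht) (List.not_mem_nil)
  | some m =>
      have := PySem.List.min?_isMin h (|l - t|) (List.mem_map_of_mem ht)
      simp only [PySem.List.len] at this ⊢; exact this

lemma mind_mem (towers : List Int) (l : Int) (hne : towers ≠ []) :
    ∃ t ∈ towers, |l - t| = pvMind towers l := by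
  unfold pvMind
  cases h : PySem.List.min? (towers.map (fun t => |l - t|)) (fun x => x) with
  | none =>
      rw [PySem.List.min?_eq_none_iff, List.map_eq_nil_iff] at h
      exact absurd h hne
  | some m =>
      obtain ⟨t, ht, heq⟩ := List.mem_map.mp (PySem.List.min?_mem h)
      exact ⟨t, ht, by simpa [heq] ⟩

-- ∃ t within d  ↔  nearest distance ≤ d  (towers nonempty)
lemma exists_cov_iff (towers : List Int) (l d : Int) (hne : towers ≠ []) :
    (∃ t ∈ towers, |l - t| ≤ d) ↔ pvMind towers l ≤ d := by
  constructor
  · rintro ⟨t, ht, hle⟩; exact le_trans (mind_le towers l t ht) hle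
  · intro h; obtain ⟨t, ht, heq⟩ := mind_mem towers l hne; exact ⟨t, ht, heq ▸ h⟩

lemma getD_zipWith (f : Bool → Int → Bool) :
    ∀ (recv : List Bool) (ls : List Int) (i : Nat), i < recv.length → i < ls.length →
      (List.zipWith f recv ls).getD i false = f (recv.getD i false) (ls.getD i 0) := by
  intro recv
  induction recv with
  | nil => intro ls i h _; simp at h
  | cons r rs ih =>
      intro ls i h1 h2
      cases ls with
      | nil => simp at h2
      | cons l ls' =>
          cases i with
          | zero => rfl
          | succ j => simpa using ih ls' j (by simpa using h1) (by simpa using h2)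

lemma all_iff_getD :
    ∀ (xs : List Bool), (xs.all (fun b => b) = true ↔ ∀ i < xs.length, xs.getD i false = true) := by
  intro xs
  induction xs with
  | nil => simp
  | cons x t ih =>
      simp only [List.all_cons, Bool.and_eq_true, ih, List.length_cons]
      constructor
      · rintro ⟨hx, h⟩ i hi
        cases i with
        | zero => exact hx
        | succ j => exact h j (by omega)
      · intro h
        exact ⟨h 0 (by omega), fun j hj => h (j + 1) (by omega)⟩

lemma cov_iff (t d l : Int) : (t - d ≤ l ∧ l < t + d + 1) ↔ |l - t| ≤ d := by
  rw [abs_le]; omega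

lemma inner_iff (listeners : List Int) (d : Int) :
    ∀ (towers : List Int) (recv : List Bool), recv.length = listeners.length →
      (pvInnerA listeners d recv towers = true ↔
        towers ≠ [] ∧ ∀ i < listeners.length,
          recv.getD i false = true ∨ ∃ t ∈ towers, |listeners.getD i 0 - t| ≤ d) := by
  intro towers
  induction towers with
  | nil => intro recv _; simp [pvInnerA]
  | cons t ts ih =>
      intro recv hlen
      have hlen' : (List.zipWith (fun (r : Bool) (l : Int) => r || decide (t - d ≤ l ∧ l < t + d + 1)) recv listeners).length = listeners.length := by
        simp [hlen]
      have hgz : ∀ i < listeners.length,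
          (List.zipWith (fun (r : Bool) (l : Int) => r || decide (t - d ≤ l ∧ l < t + d + 1)) recv listeners).getD i false
            = (recv.getD i false || decide (t - d ≤ listeners.getD i 0 ∧ listeners.getD i 0 < t + d + 1)) := by
        intro i hi
        exact getD_zipWith _ recv listeners i (by omega) hi
      by_cases hall : (List.zipWith (fun (r : Bool) (l : Int) => r || decide (t - d ≤ l ∧ l < t + d + 1)) recv listeners).all (fun b => b) = true
      · simp only [pvInnerA, hall, if_true]
        constructor
        · intro _
          refine ⟨List.cons_ne_nil _ _, fun i hi => ?_⟩
          have h1 := (all_iff_getD _).mp hall i (by omega)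
          rw [hgz i hi] at h1
          rcases Bool.or_eq_true_iff.mp h1 with h2 | h2
          · exact Or.inl h2
          · exact Or.inr ⟨t, List.mem_cons_self .., (cov_iff t d _).mp (of_decide_eq_true h2)⟩
        · intro _; trivial
      · simp only [pvInnerA, hall, Bool.false_eq_true, if_false]
        rw [ih _ hlen']
        constructor
        · rintro ⟨hts, h⟩
          refine ⟨List.cons_ne_nil _ _, fun i hi => ?_⟩
          rcases h i hi with hr | ⟨t', ht', hle⟩
          · rw [hgz i hi] at hr
            rcases Bool.or_eq_true_iff.mp hr with h2 | h2
            · exact Or.inl h2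
            · exact Or.inr ⟨t, List.mem_cons_self .., (cov_iff t d _).mp (of_decide_eq_true h2)⟩
          · exact Or.inr ⟨t', List.mem_cons_of_mem _ ht', hle⟩
        · rintro ⟨-, h⟩
          have hex : ∃ i, i < listeners.length ∧
              (List.zipWith (fun (r : Bool) (l : Int) => r || decide (t - d ≤ l ∧ l < t + d + 1)) recv listeners).getD i false = false := by
            by_contra hc
            push Not at hc
            apply hall
            rw [all_iff_getD]
            intro i hi
            have := hc i (by omega)
            revert this
            cases (List.zipWith (fun (r : Bool) (l : Int) => r || decide (t - d ≤ l ∧ l < t + d + 1)) recv listeners).getD i false <;> simp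
          obtain ⟨i0, hi0, hz0⟩ := hex
          rw [hgz i0 hi0] at hz0
          have hz1 : recv.getD i0 false = false ∧ ¬(t - d ≤ listeners.getD i0 0 ∧ listeners.getD i0 0 < t + d + 1) := by
            simpa using hz0
          constructor
          · rcases h i0 hi0 with hr | ⟨t', ht', hle⟩
            · rw [hz1.1] at hr; exact absurd hr (by simp)
            · rcases List.mem_cons.mp ht' with heq | hmem
              · subst heq
                exact absurd ((cov_iff t' d _).mpr hle) hz1.2
              · exact List.ne_nil_of_mem hmem
          · intro i hi
            rcases h i hi with hr | ⟨t', ht', hle⟩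
            · left; rw [hgz i hi, hr]; simp
            · rcases List.mem_cons.mp ht' with heq | hmem
              · subst heq
                left
                rw [hgz i hi, decide_eq_true ((cov_iff t' d _).mpr hle), Bool.or_true]
              · exact Or.inr ⟨t', hmem, hle⟩

-- full coverage at distance d
def pvP (listeners towers : List Int) (d : Int) : Prop :=
  ∀ l ∈ listeners, pvMind towers l ≤ d

lemma getD_replicate_false (n i : Nat) : (List.replicate n false).getD i false = false := by
  rw [List.getD_eq_getElem?_getD, List.getElem?_replicate]
  split <;> rfl

lemma inner_replicate_iff (listeners towers : List Int) (d : Int) (hne : towers ≠ []) :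
    pvInnerA listeners d (List.replicate listeners.length false) towers = true ↔
      pvP listeners towers d := by
  rw [inner_iff listeners d towers _ (by simp)]
  constructor
  · rintro ⟨-, h⟩ l hl
    obtain ⟨i, hi, rfl⟩ := List.mem_iff_getElem.mp hl
    rcases h i hi with hr | hex
    · rw [getD_replicate_false] at hr; exact absurd hr (by simp)
    · rw [List.getD_eq_getElem listeners 0 hi] at hex
      exact (exists_cov_iff towers _ d hne).mp hex
  · intro h
    refine ⟨hne, fun i hi => Or.inr ?_⟩
    have hl : listeners.getD i 0 ∈ listeners := by
      rw [List.getD_eq_getElem listeners 0 hi]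
      exact List.getElem_mem hi
    exact (exists_cov_iff towers _ d hne).mpr (h _ hl)

lemma foldl_max_le (B : Int) :
    ∀ (xs : List Int) (f : Int → Int) (init : Int), init ≤ B → (∀ x ∈ xs, f x ≤ B) →
      xs.foldl (fun w x => max w (f x)) init ≤ B := by
  intro xs
  induction xs with
  | nil => intro f init h _; simpa using h
  | cons x t ih =>
      intro f init h hall
      exact ih f (max init (f x)) (by
        have := hall x (List.mem_cons_self ..); omega) (fun y hy => hall y (List.mem_cons_of_mem _ hy))

lemma pvP_iff_W_le (listeners towers : List Int) (d : Int) (hd : 0 ≤ d) :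
    pvP listeners towers d ↔ listeners.foldl (fun w l => max w (pvMind towers l)) 0 ≤ d := by
  constructor
  · intro h; exact foldl_max_le d listeners _ 0 hd h
  · intro h l hl
    have := (PySem.List.le_foldl_max_int listeners (pvMind towers) 0).2 l hl
    omega

lemma outer_eq (listeners towers : List Int) (hne : towers ≠ [])
    (D : Int) (hD : D = max (listeners.foldl (fun w l => max w (pvMind towers l)) 0) 1) :
    ∀ (fuel : Nat) (d : Int), 1 ≤ d → d ≤ D → (D - d).toNat < fuel →
      pvOuterA listeners towers fuel d = D := by
  intro fuel
  induction fuel with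
  | zero => intro d _ _ h; omega
  | succ n ih =>
      intro d hd1 hdD hfuel
      have h0 : (0:Int) ≤ d := by omega
      have hiff : pvInnerA listeners d (List.replicate listeners.length false) towers = true ↔ D ≤ d := by
        rw [inner_replicate_iff listeners towers d hne, pvP_iff_W_le listeners towers d h0]
        omega
      by_cases hin : pvInnerA listeners d (List.replicate listeners.length false) towers = true
      · have : D ≤ d := hiff.mp hin
        simp only [pvOuterA, hin, if_true]
        omega
      · have hlt : d < D := by
          rcases lt_or_ge d D with h | h
          · exact h
          · exact absurd (hiff.mpr (by omega)) hin
        simp only [pvOuterA, hin]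
        exact ih (d + 1) (by omega) (by omega) (by omega)

lemma natAbs_le_sum (x : Int) (xs : List Int) (hx : x ∈ xs) :
    x.natAbs ≤ (xs.map Int.natAbs).sum := by
  induction xs with
  | nil => simp at hx
  | cons y t ih =>
      rcases List.mem_cons.mp hx with h | h
      · subst h; simp [List.map_cons, List.sum_cons]
      · have := ih h; simp only [List.map_cons, List.sum_cons]; omega

lemma fuel_big (listeners towers : List Int) (hne : towers ≠ []) :
    (max (listeners.foldl (fun w l => max w (pvMind towers l)) 0) 1 - 1).toNat <
      1 + (listeners.map Int.natAbs).sum + (towers.map Int.natAbs).sum := by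
  obtain ⟨t0, ht0⟩ : ∃ t, t ∈ towers := by cases towers with
    | nil => exact absurd rfl hne
    | cons a b => exact ⟨a, List.mem_cons_self ..⟩
  have hB : ∀ l ∈ listeners, pvMind towers l ≤
      ((listeners.map Int.natAbs).sum : Nat) + ((towers.map Int.natAbs).sum : Nat) := by
    intro l hl
    have h1 := mind_le towers l t0 ht0
    have h2 := natAbs_le_sum l listeners hl
    have h3 := natAbs_le_sum t0 towers ht0
    have habs : |l - t0| ≤ (l.natAbs : Int) + (t0.natAbs : Int) := by
      rw [abs_le]; omega
    omega
  have hW := foldl_max_le (((listeners.map Int.natAbs).sum : Nat) + ((towers.map Int.natAbs).sum : Nat))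
    listeners (pvMind towers) 0 (by positivity) hB
  omega

-- ===== VERDICT (by name: the statement is the Claim_ definition above) =====
theorem solve_iter_spec : Claim_equal_solve_iter := by
  intro listeners towers _ hpre
  unfold Spec_solve_iter
  rw [alt_eq, solve_iter]
  exact outer_eq listeners towers hpre _ rfl _ 1 le_rfl (by omega) (fuel_big listeners towers hpre)
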